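-- pv_equiv track=rewrite | github.com/kvandre12-commits/SharpEdge-System | scripts/run_playbook.py | infer_is_slow
-- ===== SOURCE A (Python) =====
-- def infer_is_slow(reg_row: dict) -> bool:
--     """
--     Robust 'slow' detector across different regime schemas.
--     We don't assume a single column name.
--     """
--     if not reg_row:
--         return False
--
--     # common boolean flags
--     for k in ("is_slow", "slow_flag", "slow_regime_flag"):
--         v = reg_row.get(k)
--         if v in (1, True, "1", "true", "TRUE", "True"):
--             return True
--
--     # common string labels
--     for k in ("vol_state", "speed_state", "regime", "regime_label", "state"):
--         v = reg_row.get(k)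
--         if isinstance(v, str) and "slow" in v.lower():
--             return True
--
--     return False
-- ===== SOURCE B (Python) =====
-- BOOL_KEYS = {"is_slow", "slow_flag", "slow_regime_flag"}
-- STR_KEYS = {"vol_state", "speed_state", "regime", "regime_label", "state"}
-- TRUTHY = (1, True, "1", "true", "TRUE", "True")
--
--
-- def infer_is_slow(reg_row: dict) -> bool:
--     # One pass over the row: classify each entry instead of probing a fixed
--     # schedule of keys with .get().
--     for k, v in reg_row.items():
--         if k in BOOL_KEYS:
--             if v in TRUTHY:
--                 return True
--         elif k in STR_KEYS and isinstance(v, str) and "slow" in v.lower():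
--             return True
--     return False
-- ===== Notes on version B (the rewrite author's own statement) =====
-- stated objective: alternative
-- what changed: B makes a single pass over reg_row.items(), classifying each entry against two key sets, instead of probing a fixed schedule of eight keys with .get(); the empty-dict guard disappears since the loop handles it.
import Mathlib
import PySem

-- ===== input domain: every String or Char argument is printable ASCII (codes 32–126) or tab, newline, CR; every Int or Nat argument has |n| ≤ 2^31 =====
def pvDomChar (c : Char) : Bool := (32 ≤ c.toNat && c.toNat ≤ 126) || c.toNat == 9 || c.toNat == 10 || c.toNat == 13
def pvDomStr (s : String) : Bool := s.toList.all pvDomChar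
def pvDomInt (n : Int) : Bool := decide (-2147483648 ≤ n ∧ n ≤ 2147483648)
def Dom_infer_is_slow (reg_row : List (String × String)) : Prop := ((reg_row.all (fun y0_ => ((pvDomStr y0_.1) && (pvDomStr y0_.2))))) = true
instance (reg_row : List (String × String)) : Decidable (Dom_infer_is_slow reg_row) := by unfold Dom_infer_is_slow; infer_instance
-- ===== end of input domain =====

-- B differs from A only in decomposition (single pass over the items vs a fixed probe schedule); return values agree everywhere.

-- ===== PORT A =====
-- Values are strings here, so `v in (1, True, "1", "true", "TRUE", "True")` can only match the four string literals.
def infer_is_slow (reg_row : List (String × String)) : Bool :=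
  let d := PySem.Dict.ofList reg_row
  if reg_row.isEmpty then false
  else if ["is_slow", "slow_flag", "slow_regime_flag"].any (fun k =>
      match d.get? k with
      | some v => ["1", "true", "TRUE", "True"].contains v
      | none => false) then true
  else if ["vol_state", "speed_state", "regime", "regime_label", "state"].any (fun k =>
      match d.get? k with
      | some v => PySem.Str.isIn "slow" (PySem.Str.lower v)
      | none => false) then true
  else false

-- ===== PORT B =====
def infer_is_slow_alt (reg_row : List (String × String)) : Bool :=
  (PySem.Dict.ofList reg_row).items.any (fun p =>
    if ["is_slow", "slow_flag", "slow_regime_flag"].contains p.1 then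
      ["1", "true", "TRUE", "True"].contains p.2
    else
      ["vol_state", "speed_state", "regime", "regime_label", "state"].contains p.1 &&
        PySem.Str.isIn "slow" (PySem.Str.lower p.2))

-- ===== PRECONDITION & SPEC =====
def Spec_infer_is_slow (reg_row : List (String × String)) (out : Bool) : Prop := out = infer_is_slow_alt reg_row
instance (reg_row : List (String × String)) (out : Bool) : Decidable (Spec_infer_is_slow reg_row out) := by unfold Spec_infer_is_slow; infer_instance

-- ===== CLAIM (what is proved, stated in full; the proofs are below) =====
def Claim_equal_infer_is_slow : Prop := ∀ (reg_row : List (String × String)), Dom_infer_is_slow reg_row → Spec_infer_is_slow reg_row (infer_is_slow reg_row)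

-- ===== LEMMAS AND PROOFS =====

theorem infer_is_slow_key_equiv (d : PySem.Dict String String) (hnd : d.keys.Nodup) :
    (d.items.any (fun p =>
      if ["is_slow", "slow_flag", "slow_regime_flag"].contains p.1 then
        ["1", "true", "TRUE", "True"].contains p.2
      else
        ["vol_state", "speed_state", "regime", "regime_label", "state"].contains p.1 &&
          PySem.Str.isIn "slow" (PySem.Str.lower p.2)))
    = (["is_slow", "slow_flag", "slow_regime_flag"].any (fun k =>
        match d.get? k with
        | some v => ["1", "true", "TRUE", "True"].contains v
        | none => false)
      || ["vol_state", "speed_state", "regime", "regime_label", "state"].any (fun k =>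
        match d.get? k with
        | some v => PySem.Str.isIn "slow" (PySem.Str.lower v)
        | none => false)) := by
  apply Bool.eq_iff_iff.mpr
  simp only [List.any_eq_true, Bool.or_eq_true]
  constructor
  · rintro ⟨⟨k, v⟩, hmem, hf⟩
    have hget : d.get? k = some v := PySem.Dict.get?_of_mem_items d hmem hnd
    by_cases hb : ["is_slow", "slow_flag", "slow_regime_flag"].contains k
    · left
      refine ⟨k, by simpa using hb, ?_⟩
      simp only [hb, if_true] at hf
      simp only [hget]
      simpa using hf
    · right
      rw [if_neg hb, Bool.and_eq_true] at hf
      refine ⟨k, by simpa using hf.1, ?_⟩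
      simp only [hget]
      simpa using hf.2
  · rintro (⟨k, hk, hf⟩ | ⟨k, hk, hf⟩)
    all_goals {
      rcases hget : d.get? k with _ | v
      · simp [hget] at hf
      · refine ⟨(k, v), PySem.Dict.mem_items_of_get?_eq_some d hget, ?_⟩
        simp only [hget] at hf
        simp only [List.mem_cons, List.not_mem_nil, or_false] at hk
        first
        | rcases hk with rfl | rfl | rfl <;> simp_all
        | rcases hk with rfl | rfl | rfl | rfl | rfl <;> simp_all
    }

theorem infer_is_slow_spec' (reg_row : List (String × String)) :
    infer_is_slow reg_row = infer_is_slow_alt reg_row := by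
  unfold infer_is_slow infer_is_slow_alt
  rcases reg_row with _ | ⟨p, rest⟩
  · decide
  · simp only [List.isEmpty_cons, if_false, Bool.false_eq_true]
    rw [infer_is_slow_key_equiv _ (PySem.Dict.nodup_keys_ofList _)]
    rcases h1 : (["is_slow", "slow_flag", "slow_regime_flag"].any _) <;>
      rcases h2 : (["vol_state", "speed_state", "regime", "regime_label", "state"].any _) <;>
      simp

-- ===== VERDICT (by name: the statement is the Claim_ definition above) =====
theorem infer_is_slow_spec : Claim_equal_infer_is_slow := by
  intro reg_row _
  unfold Spec_infer_is_slow
  exact infer_is_slow_spec' reg_row
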